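-- pv_equiv track=rewrite | github.com/vuminhdiep/BigO-Orange | Greedy/finding a taxi.py | findingTaxi
-- ===== SOURCE A (Python) =====
-- def findingTaxi(a, k):
--     result = 0
--     user = []
--     taxi = []
--     for i in range(len(a)):
--         if a[i] == 'U':
--             user.append(i)
--
--         elif a[i] == 'T':
--             taxi.append(i)
--
--     j = i = 0
--     while j < len(taxi) and i < len(user):
--         if abs(user[i] - taxi[j]) <= k:
--             result += 1
--             i += 1
--             j += 1
--         elif user[i] > taxi[j]:
--             j += 1
--         else:
--             i += 1
--     return result
-- ===== SOURCE B (Python) =====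
-- def findingTaxi(a, k):
--     # Single left-to-right pass: a queue of pending unmatched positions of one
--     # kind; each new opposite-kind event expires stale fronts and matches one.
--     result = 0
--     pending = []
--     kind = ''
--     for i, c in enumerate(a):
--         if c != 'U' and c != 'T':
--             continue
--         if pending and kind != c:
--             while pending and i - pending[0] > k:
--                 pending.pop(0)
--             if pending:
--                 pending.pop(0)
--                 result += 1
--             else:
--                 pending = [i]
--                 kind = c
--         elif pending:
--             pending.append(i)
--         else:
--             pending = [i]
--             kind = c
--     return result
-- ===== Notes on version B (the rewrite author's own statement) =====
-- stated objective: alternative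
-- what changed: A collects all user and taxi indices first and then runs a two-pointer merge over the two lists; B makes a single left-to-right pass over the string keeping a queue of pending unmatched positions of one kind, expiring fronts farther than k from the current index and matching at most one per event.
import Mathlib
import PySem

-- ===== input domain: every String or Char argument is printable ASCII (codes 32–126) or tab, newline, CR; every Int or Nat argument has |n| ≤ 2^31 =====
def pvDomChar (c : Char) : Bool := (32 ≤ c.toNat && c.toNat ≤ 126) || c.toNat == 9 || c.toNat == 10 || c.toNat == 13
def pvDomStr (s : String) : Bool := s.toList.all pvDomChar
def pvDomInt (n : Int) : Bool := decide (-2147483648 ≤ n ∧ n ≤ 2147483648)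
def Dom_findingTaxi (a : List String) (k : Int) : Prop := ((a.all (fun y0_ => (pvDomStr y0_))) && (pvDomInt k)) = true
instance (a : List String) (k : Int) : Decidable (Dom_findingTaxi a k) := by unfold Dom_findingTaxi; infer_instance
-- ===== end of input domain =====

-- B replaces A's collect-then-two-pointer matching by a single left-to-right scan
-- with a queue of pending unmatched positions of one kind (objective: alternative).

-- ===== PORT A =====
-- A's while loop: indices i into user, j into taxi.
def aLoop (user taxi : List Int) (k i j result : Int) : Int :=
  if h : j < (taxi.length : Int) ∧ i < (user.length : Int) then
    if |PySem.List.pyGetD user i 0 - PySem.List.pyGetD taxi j 0| ≤ k then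
      aLoop user taxi k (i + 1) (j + 1) (result + 1)
    else if PySem.List.pyGetD user i 0 > PySem.List.pyGetD taxi j 0 then
      aLoop user taxi k i (j + 1) result
    else
      aLoop user taxi k (i + 1) j result
  else result
termination_by (((user.length : Int) - i) + (((taxi.length : Int)) - j)).toNat
decreasing_by all_goals omega

def findingTaxi (a : List String) (k : Int) : Int :=
  let ut := (PySem.List.pyRange 0 (a.length : Int) 1).foldl
    (fun (ut : List Int × List Int) i =>
      if PySem.List.pyGetD a i "" == "U" then (ut.1 ++ [i], ut.2)
      else if PySem.List.pyGetD a i "" == "T" then (ut.1, ut.2 ++ [i])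
      else ut) ([], [])
  aLoop ut.1 ut.2 k 0 0 0

-- ===== PORT B =====
-- B's inner while loop: drop expired fronts of the pending queue.
def expireB (k i : Int) : List Int → List Int
  | [] => []
  | p :: ps => if i - p > k then expireB k i ps else p :: ps

-- body of B's for loop over enumerate(a)
def stepB (k : Int) (st : Int × List Int × String) (e : Int × String) : Int × List Int × String :=
  if e.2 ≠ "U" ∧ e.2 ≠ "T" then st
  else if st.2.1 ≠ [] ∧ st.2.2 ≠ e.2 then
    match expireB k e.1 st.2.1 with
    | _ :: rest => (st.1 + 1, rest, st.2.2)
    | [] => (st.1, [e.1], e.2)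
  else if st.2.1 ≠ [] then (st.1, st.2.1 ++ [e.1], st.2.2)
  else (st.1, [e.1], e.2)

def findingTaxi_alt (a : List String) (k : Int) : Int :=
  ((PySem.List.enumerate a 0).foldl (stepB k) (0, [], "")).1

-- ===== PRECONDITION & SPEC =====
def Spec_findingTaxi (a : List String) (k : Int) (out : Int) : Prop := out = findingTaxi_alt a k
instance (a : List String) (k : Int) (out : Int) : Decidable (Spec_findingTaxi a k out) := by unfold Spec_findingTaxi; infer_instance

-- ===== CLAIM (what is proved, stated in full; the proofs are below) =====
def Claim_equal_findingTaxi : Prop := ∀ (a : List String) (k : Int), Dom_findingTaxi a k → Spec_findingTaxi a k (findingTaxi a k)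

-- ===== LEMMAS AND PROOFS =====

-- common reference function: greedy two-pointer on the sorted position lists
def twoPtr (k : Int) : List Int → List Int → Int
  | _, [] => 0
  | [], _ :: _ => 0
  | u :: us, t :: ts =>
    if |u - t| ≤ k then 1 + twoPtr k us ts
    else if u > t then twoPtr k (u :: us) ts
    else twoPtr k us (t :: ts)
termination_by us ts => us.length + ts.length

def evU (es : List (Int × String)) : List Int :=
  es.filterMap (fun e => if e.2 == "U" then some e.1 else none)
def evT (es : List (Int × String)) : List Int :=
  es.filterMap (fun e => if e.2 == "T" then some e.1 else none)

lemma twoPtr_nil_right (k : Int) (us : List Int) : twoPtr k us [] = 0 := by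
  cases us <;> simp [twoPtr]

lemma twoPtr_nil_left (k : Int) (ts : List Int) : twoPtr k [] ts = 0 := by
  cases ts <;> simp [twoPtr]

lemma twoPtr_cons (k u t : Int) (us ts : List Int) :
    twoPtr k (u :: us) (t :: ts) =
      if |u - t| ≤ k then 1 + twoPtr k us ts
      else if u > t then twoPtr k (u :: us) ts
      else twoPtr k us (t :: ts) := by
  simp [twoPtr]

-- A's index loop computes twoPtr of the remaining suffixes
lemma aLoop_drop (user taxi : List Int) (k : Int) :
    ∀ (N n m : Nat) (res : Int), user.length - n + (taxi.length - m) ≤ N →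
    aLoop user taxi k (n : Int) (m : Int) res = res + twoPtr k (user.drop n) (taxi.drop m) := by
  intro N
  induction N with
  | zero =>
    intro n m res hN
    rw [aLoop]
    rw [dif_neg (by omega)]
    have h1 : user.length ≤ n := by omega
    have h2 : taxi.length ≤ m := by omega
    rw [List.drop_eq_nil_of_le h1, twoPtr_nil_left]
    omega
  | succ N ih =>
    intro n m res hN
    by_cases hg : m < taxi.length ∧ n < user.length
    · obtain ⟨hm, hn⟩ := hg
      rw [aLoop, dif_pos (by constructor <;> [exact_mod_cast hm; exact_mod_cast hn])]
      have hu : PySem.List.pyGetD user (n : Int) 0 = user[n] := by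
        simp [PySem.List.pyGetD_natCast, List.getD_eq_getElem?_getD, List.getElem?_eq_getElem hn]
      have ht : PySem.List.pyGetD taxi (m : Int) 0 = taxi[m] := by
        simp [PySem.List.pyGetD_natCast, List.getD_eq_getElem?_getD, List.getElem?_eq_getElem hm]
      rw [hu, ht]
      rw [List.drop_eq_getElem_cons hn, List.drop_eq_getElem_cons hm, twoPtr_cons]
      split_ifs with h1 h2
      · have := ih (n + 1) (m + 1) (res + 1) (by omega)
        push_cast at this
        rw [this]; ring
      · have := ih n (m + 1) res (by omega)
        push_cast at this
        rw [this, ← List.drop_eq_getElem_cons hn]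
      · have := ih (n + 1) m res (by omega)
        push_cast at this
        rw [this, ← List.drop_eq_getElem_cons hm]
    · rw [aLoop, dif_neg (by omega)]
      rcases not_and_or.mp hg with h | h
      · rw [List.drop_eq_nil_of_le (by omega : taxi.length ≤ m), twoPtr_nil_right]; omega
      · rw [List.drop_eq_nil_of_le (by omega : user.length ≤ n), twoPtr_nil_left]; omega

-- A's building for-loop produces the U- and T-position lists of the enumeration
lemma buildA (A : List String) :
    ∀ (post pre : List String), A = pre ++ post → ∀ (u0 t0 : List Int),
    (PySem.List.pyRange (pre.length : Int) (A.length : Int) 1).foldl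
      (fun (ut : List Int × List Int) i =>
        if PySem.List.pyGetD A i "" == "U" then (ut.1 ++ [i], ut.2)
        else if PySem.List.pyGetD A i "" == "T" then (ut.1, ut.2 ++ [i])
        else ut) (u0, t0)
    = (u0 ++ evU (PySem.List.enumerate post (pre.length : Int)),
       t0 ++ evT (PySem.List.enumerate post (pre.length : Int))) := by
  intro post
  induction post with
  | nil =>
    intro pre h u0 t0
    subst h
    rw [PySem.List.pyRange_one_eq_nil (by simp)]
    simp [PySem.List.enumerate, evU, evT]
  | cons c post ih =>
    intro pre h u0 t0
    have hlen : A.length = pre.length + post.length + 1 := by subst h; simp; omega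
    rw [PySem.List.pyRange_one_cons (by push_cast [hlen]; omega), List.foldl_cons]
    have hget : PySem.List.pyGetD A ((pre.length : Nat) : Int) "" = c := by
      subst h
      rw [PySem.List.pyGetD_natCast, List.getD_eq_getElem?_getD,
        List.getElem?_append_right (Nat.le_refl _)]
      simp
    rw [hget, PySem.List.enumerate_cons]
    have h' : A = (pre ++ [c]) ++ post := by simp [h]
    by_cases hU : c = "U"
    · subst hU
      simp only [show (("U" : String) == "U") = true from by decide, if_true]
      rw [show (pre.length : Int) + 1 = (((pre ++ ["U"]).length : Nat) : Int) from by simp]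
      rw [ih (pre ++ ["U"]) h' (u0 ++ [((pre.length : Nat) : Int)]) t0]
      simp [evU, evT]
    · by_cases hT : c = "T"
      · subst hT
        simp only [show (("T" : String) == "U") = false from by decide,
          show (("T" : String) == "T") = true from by decide,
          Bool.false_eq_true, if_false, if_true]
        rw [show (pre.length : Int) + 1 = (((pre ++ ["T"]).length : Nat) : Int) from by simp]
        rw [ih (pre ++ ["T"]) h' u0 (t0 ++ [((pre.length : Nat) : Int)])]
        simp [evU, evT]
      · have h1 : ((c : String) == "U") = false := beq_false_of_ne hU
        have h2 : ((c : String) == "T") = false := beq_false_of_ne hT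
        simp only [h1, h2, Bool.false_eq_true, if_false]
        rw [show (pre.length : Int) + 1 = (((pre ++ [c]).length : Nat) : Int) from by simp]
        rw [ih (pre ++ [c]) h' u0 t0]
        simp [evU, evT, hU, hT]

-- stepB ignores non-letter events
lemma foldl_stepB_filter (k : Int) :
    ∀ (es : List (Int × String)) (st : Int × List Int × String),
    es.foldl (stepB k) st = (es.filter (fun e => e.2 == "U" || e.2 == "T")).foldl (stepB k) st := by
  intro es
  induction es with
  | nil => intro st; rfl
  | cons e es ih =>
    intro st
    by_cases h : (e.2 == "U" || e.2 == "T") = true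
    · simp only [List.foldl_cons, List.filter_cons, h, if_true, List.foldl_cons]
      exact ih _
    · have hid : stepB k st e = st := by
        simp only [Bool.or_eq_true, beq_iff_eq] at h
        rw [not_or] at h
        simp [stepB, h.1, h.2]
      simp only [List.foldl_cons, List.filter_cons, h, Bool.false_eq_true, if_false, hid]
      exact ih _

lemma mem_expireB {k i q : Int} : ∀ {Q : List Int}, q ∈ expireB k i Q → q ∈ Q := by
  intro Q
  induction Q with
  | nil => simp [expireB]
  | cons p ps ih =>
    simp only [expireB]
    split_ifs with h
    · intro hm; exact List.mem_cons_of_mem _ (ih hm)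
    · exact fun hm => hm

-- expiring + matching against a new taxi t, seen through twoPtr (queue of users)
lemma twoPtr_expire_user (k t : Int) :
    ∀ (Q : List Int) (X ts : List Int), (∀ q ∈ Q, q < t) →
    twoPtr k (Q ++ X) (t :: ts) =
      (match expireB k t Q with
       | [] => twoPtr k X (t :: ts)
       | _ :: rest => 1 + twoPtr k (rest ++ X) ts) := by
  intro Q
  induction Q with
  | nil => intro X ts _; simp [expireB]
  | cons q Q ih =>
    intro X ts hlt
    have hq : q < t := hlt q List.mem_cons_self
    have habs : |q - t| = t - q := by rw [abs_of_neg (by omega)]; ring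
    by_cases hkk : t - q > k
    · rw [List.cons_append, twoPtr_cons, if_neg (by rw [habs]; omega), if_neg (by omega)]
      rw [ih X ts (fun x hx => hlt x (List.mem_cons_of_mem _ hx))]
      simp only [expireB, if_pos hkk]
    · rw [List.cons_append, twoPtr_cons, if_pos (by rw [habs]; omega)]
      simp only [expireB, if_neg hkk]

-- expiring + matching against a new user u, seen through twoPtr (queue of taxis)
lemma twoPtr_expire_taxi (k u : Int) :
    ∀ (Q : List Int) (us ts : List Int), (∀ q ∈ Q, q < u) →
    twoPtr k (u :: us) (Q ++ ts) =
      (match expireB k u Q with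
       | [] => twoPtr k (u :: us) ts
       | _ :: rest => 1 + twoPtr k us (rest ++ ts)) := by
  intro Q
  induction Q with
  | nil => intro us ts _; simp [expireB]
  | cons q Q ih =>
    intro us ts hlt
    have hq : q < u := hlt q List.mem_cons_self
    have habs : |u - q| = u - q := abs_of_pos (by omega)
    by_cases hkk : u - q > k
    · rw [List.cons_append, twoPtr_cons, if_neg (by rw [habs]; omega), if_pos (by omega)]
      rw [ih us ts (fun x hx => hlt x (List.mem_cons_of_mem _ hx))]
      simp only [expireB, if_pos hkk]
    · rw [List.cons_append, twoPtr_cons, if_pos (by rw [habs]; omega)]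
      simp only [expireB, if_neg hkk]

-- the key invariant of B's scan
lemma scanB (k : Int) :
    ∀ (es : List (Int × String)) (res : Int) (Q : List Int) (kind : String),
    (∀ e ∈ es, e.2 = "U" ∨ e.2 = "T") →
    es.Pairwise (fun x y => x.1 < y.1) →
    (∀ q ∈ Q, ∀ e ∈ es, q < e.1) →
    ((kind = "U" ∨ Q = []) →
      (es.foldl (stepB k) (res, Q, kind)).1 = res + twoPtr k (Q ++ evU es) (evT es))
    ∧ ((kind = "T" ∨ Q = []) →
      (es.foldl (stepB k) (res, Q, kind)).1 = res + twoPtr k (evU es) (Q ++ evT es)) := by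
  intro es
  induction es with
  | nil =>
    intro res Q kind _ _ _
    constructor <;> intro _ <;> simp [evU, evT, twoPtr_nil_right, twoPtr_nil_left]
  | cons e es ih =>
    intro res Q kind hc hasc hlt
    obtain ⟨i, c⟩ := e
    have hc0 : c = "U" ∨ c = "T" := hc _ List.mem_cons_self
    have hces : ∀ e ∈ es, e.2 = "U" ∨ e.2 = "T" := fun e he => hc e (List.mem_cons_of_mem _ he)
    have hasc' : es.Pairwise (fun x y => x.1 < y.1) := hasc.tail
    have hi_lt : ∀ e ∈ es, i < e.1 := by
      intro e he; exact (List.pairwise_cons.mp hasc).1 e he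
    have hQi : ∀ q ∈ Q, q < i := fun q hq => hlt q hq _ List.mem_cons_self
    have hQes : ∀ q ∈ Q, ∀ e ∈ es, q < e.1 := fun q hq e he => hlt q hq e (List.mem_cons_of_mem _ he)
    -- the letter branch of stepB never fires
    have hnotskip : ¬ (c ≠ "U" ∧ c ≠ "T") := by rcases hc0 with h | h <;> simp [h]
    constructor
    · -- P1 : queue holds users (or is empty)
      intro hk
      rcases hk with hk | hk
      · subst hk
        rcases List.eq_nil_or_concat' Q with hQ | _
        · subst hQ
          -- empty queue: push i, kind becomes c
          have hstep : stepB k (res, [], "U") (i, c) = (res, [i], c) := by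
            simp [stepB, hnotskip]
          rw [List.foldl_cons, hstep]
          rcases hc0 with hcU | hcT
          · subst hcU
            have := (ih res [i] "U" hces hasc'
              (by intro q hq e he; simp at hq; subst hq; exact hi_lt e he)).1 (Or.inl rfl)
            rw [this]
            simp [evU, evT]
          · subst hcT
            have := (ih res [i] "T" hces hasc'
              (by intro q hq e he; simp at hq; subst hq; exact hi_lt e he)).2 (Or.inl rfl)
            rw [this]
            simp [evU, evT]
        · -- nonempty user queue
          have hQne : Q ≠ [] := by rcases ‹∃ l b, Q = l ++ [b]› with ⟨l, b, rfl⟩; simp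
          rcases hc0 with hcU | hcT
          · -- same kind: append
            subst hcU
            have hstep : stepB k (res, Q, "U") (i, "U") = (res, Q ++ [i], "U") := by
              simp [stepB, hQne]
            rw [List.foldl_cons, hstep]
            have := (ih res (Q ++ [i]) "U" hces hasc'
              (by intro q hq e he
                  rcases List.mem_append.mp hq with h | h
                  · exact hQes q h e he
                  · simp at h; subst h; exact hi_lt e he)).1 (Or.inl rfl)
            rw [this]
            simp [evU, evT, List.append_assoc]
          · -- opposite kind: expire then match or reset
            subst hcT
            have hexp := twoPtr_expire_user k i Q (evU es) (evT es) hQi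
            have hne : (("U" : String) ≠ ("T" : String)) := by decide
            cases hE : expireB k i Q with
            | nil =>
              have hstep : stepB k (res, Q, "U") (i, "T") = (res, [i], "T") := by
                simp [stepB, hQne, hne, hE]
              rw [List.foldl_cons, hstep]
              have := (ih res [i] "T" hces hasc'
                (by intro q hq e he; simp at hq; subst hq; exact hi_lt e he)).2 (Or.inl rfl)
              rw [this]
              rw [hE] at hexp
              simp only [evU, evT, List.filterMap_cons] at *
              simp only [show (("T":String) == "U") = false from by decide,
                show (("T":String) == "T") = true from by decide] at *
              simp only [Bool.false_eq_true, if_false, if_true] at *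
              rw [hexp]
              simp
            | cons u rest =>
              have hstep : stepB k (res, Q, "U") (i, "T") = (res + 1, rest, "U") := by
                simp [stepB, hQne, hne, hE]
              rw [List.foldl_cons, hstep]
              have := (ih (res + 1) rest "U" hces hasc'
                (by intro q hq e he
                    exact hQes q (mem_expireB (hE ▸ List.mem_cons_of_mem _ hq)) e he)).1
                (Or.inl rfl)
              rw [this]
              rw [hE] at hexp
              simp only [evU, evT, List.filterMap_cons] at *
              simp only [show (("T":String) == "U") = false from by decide,
                show (("T":String) == "T") = true from by decide] at *
              simp only [Bool.false_eq_true, if_false, if_true] at *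
              rw [hexp]
              ring
      · -- empty queue case (kind arbitrary)
        subst hk
        have hstep : stepB k (res, [], kind) (i, c) = (res, [i], c) := by
          simp [stepB, hnotskip]
        rw [List.foldl_cons, hstep]
        rcases hc0 with hcU | hcT
        · subst hcU
          have := (ih res [i] "U" hces hasc'
            (by intro q hq e he; simp at hq; subst hq; exact hi_lt e he)).1 (Or.inl rfl)
          rw [this]
          simp [evU, evT]
        · subst hcT
          have := (ih res [i] "T" hces hasc'
            (by intro q hq e he; simp at hq; subst hq; exact hi_lt e he)).2 (Or.inl rfl)
          rw [this]
          simp [evU, evT]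
    · -- P2 : queue holds taxis (or is empty)
      intro hk
      rcases hk with hk | hk
      · subst hk
        rcases List.eq_nil_or_concat' Q with hQ | _
        · subst hQ
          have hstep : stepB k (res, [], "T") (i, c) = (res, [i], c) := by
            simp [stepB, hnotskip]
          rw [List.foldl_cons, hstep]
          rcases hc0 with hcU | hcT
          · subst hcU
            have := (ih res [i] "U" hces hasc'
              (by intro q hq e he; simp at hq; subst hq; exact hi_lt e he)).1 (Or.inl rfl)
            rw [this]
            simp [evU, evT]
          · subst hcT
            have := (ih res [i] "T" hces hasc'
              (by intro q hq e he; simp at hq; subst hq; exact hi_lt e he)).2 (Or.inl rfl)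
            rw [this]
            simp [evU, evT]
        · have hQne : Q ≠ [] := by rcases ‹∃ l b, Q = l ++ [b]› with ⟨l, b, rfl⟩; simp
          rcases hc0 with hcU | hcT
          · -- opposite kind: expire then match or reset
            subst hcU
            have hexp := twoPtr_expire_taxi k i Q (evU es) (evT es) hQi
            have hne : (("T" : String) ≠ ("U" : String)) := by decide
            cases hE : expireB k i Q with
            | nil =>
              have hstep : stepB k (res, Q, "T") (i, "U") = (res, [i], "U") := by
                simp [stepB, hQne, hne, hE]
              rw [List.foldl_cons, hstep]
              have := (ih res [i] "U" hces hasc'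
                (by intro q hq e he; simp at hq; subst hq; exact hi_lt e he)).1 (Or.inl rfl)
              rw [this]
              rw [hE] at hexp
              simp only [evU, evT, List.filterMap_cons] at *
              simp only [show (("U":String) == "U") = true from by decide,
                show (("U":String) == "T") = false from by decide] at *
              simp only [Bool.false_eq_true, if_false, if_true] at *
              rw [hexp]
              simp
            | cons t rest =>
              have hstep : stepB k (res, Q, "T") (i, "U") = (res + 1, rest, "T") := by
                simp [stepB, hQne, hne, hE]
              rw [List.foldl_cons, hstep]
              have := (ih (res + 1) rest "T" hces hasc'
                (by intro q hq e he
                    exact hQes q (mem_expireB (hE ▸ List.mem_cons_of_mem _ hq)) e he)).2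
                (Or.inl rfl)
              rw [this]
              rw [hE] at hexp
              simp only [evU, evT, List.filterMap_cons] at *
              simp only [show (("U":String) == "U") = true from by decide,
                show (("U":String) == "T") = false from by decide] at *
              simp only [Bool.false_eq_true, if_false, if_true] at *
              rw [hexp]
              ring
          · -- same kind: append
            subst hcT
            have hstep : stepB k (res, Q, "T") (i, "T") = (res, Q ++ [i], "T") := by
              simp [stepB, hQne]
            rw [List.foldl_cons, hstep]
            have := (ih res (Q ++ [i]) "T" hces hasc'
              (by intro q hq e he
                  rcases List.mem_append.mp hq with h | h
                  · exact hQes q h e he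
                  · simp at h; subst h; exact hi_lt e he)).2 (Or.inl rfl)
            rw [this]
            simp [evU, evT, List.append_assoc]
      · subst hk
        have hstep : stepB k (res, [], kind) (i, c) = (res, [i], c) := by
          simp [stepB, hnotskip]
        rw [List.foldl_cons, hstep]
        rcases hc0 with hcU | hcT
        · subst hcU
          have := (ih res [i] "U" hces hasc'
            (by intro q hq e he; simp at hq; subst hq; exact hi_lt e he)).1 (Or.inl rfl)
          rw [this]
          simp [evU, evT]
        · subst hcT
          have := (ih res [i] "T" hces hasc'
            (by intro q hq e he; simp at hq; subst hq; exact hi_lt e he)).2 (Or.inl rfl)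
          rw [this]
          simp [evU, evT]

lemma evU_filter (es : List (Int × String)) :
    evU (es.filter (fun e => e.2 == "U" || e.2 == "T")) = evU es := by
  induction es with
  | nil => rfl
  | cons e es ih =>
    simp only [evU] at ih ⊢
    by_cases hU : e.2 = "U"
    · have hp : (e.2 == "U" || e.2 == "T") = true := by simp [hU]
      rw [List.filter_cons, if_pos hp, List.filterMap_cons, List.filterMap_cons, ih]
    · by_cases hT : e.2 = "T"
      · have hp : (e.2 == "U" || e.2 == "T") = true := by simp [hT]
        rw [List.filter_cons, if_pos hp, List.filterMap_cons, List.filterMap_cons, ih]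
      · have hp : (e.2 == "U" || e.2 == "T") = false := by simp [hU, hT]
        rw [List.filter_cons, if_neg (by simp [hp]), List.filterMap_cons, ih]
        simp [beq_false_of_ne hU]

lemma evT_filter (es : List (Int × String)) :
    evT (es.filter (fun e => e.2 == "U" || e.2 == "T")) = evT es := by
  induction es with
  | nil => rfl
  | cons e es ih =>
    simp only [evT] at ih ⊢
    by_cases hT : e.2 = "T"
    · have hp : (e.2 == "U" || e.2 == "T") = true := by simp [hT]
      rw [List.filter_cons, if_pos hp, List.filterMap_cons, List.filterMap_cons, ih]
    · by_cases hU : e.2 = "U"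
      · have hp : (e.2 == "U" || e.2 == "T") = true := by simp [hU]
        rw [List.filter_cons, if_pos hp, List.filterMap_cons, List.filterMap_cons, ih]
      · have hp : (e.2 == "U" || e.2 == "T") = false := by simp [hU, hT]
        rw [List.filter_cons, if_neg (by simp [hp]), List.filterMap_cons, ih]
        simp [beq_false_of_ne hT]

lemma enumerate_pairwise (a : List String) :
    (PySem.List.enumerate a 0).Pairwise (fun x y => x.1 < y.1) := by
  have h := PySem.List.pairwise_lt_pyRange_one 0 (0 + (a.length : Int))
  rw [← PySem.List.map_fst_enumerate a 0] at h
  exact List.pairwise_map.mp h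

-- A computes twoPtr of the U- and T-position lists
lemma findingTaxi_eq (a : List String) (k : Int) :
    findingTaxi a k = twoPtr k (evU (PySem.List.enumerate a 0)) (evT (PySem.List.enumerate a 0)) := by
  have hb := buildA a a [] rfl [] []
  simp only [List.length_nil, Nat.cast_zero] at hb
  simp only [findingTaxi]
  rw [hb]
  have := aLoop_drop (evU (PySem.List.enumerate a 0)) (evT (PySem.List.enumerate a 0)) k
    ((evU (PySem.List.enumerate a 0)).length + (evT (PySem.List.enumerate a 0)).length) 0 0 0
    (by omega)
  simpa using this

-- B computes the same
lemma findingTaxi_alt_eq (a : List String) (k : Int) :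
    findingTaxi_alt a k = twoPtr k (evU (PySem.List.enumerate a 0)) (evT (PySem.List.enumerate a 0)) := by
  unfold findingTaxi_alt
  rw [foldl_stepB_filter]
  set es := PySem.List.enumerate a 0 with hes
  set fes := es.filter (fun e => e.2 == "U" || e.2 == "T") with hfes
  have hc : ∀ e ∈ fes, e.2 = "U" ∨ e.2 = "T" := by
    intro e he
    have := List.of_mem_filter he
    rcases Bool.or_eq_true _ _ |>.mp this with h | h
    · exact Or.inl (beq_iff_eq.mp h)
    · exact Or.inr (beq_iff_eq.mp h)
  have hasc : fes.Pairwise (fun x y => x.1 < y.1) :=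
    List.Pairwise.sublist List.filter_sublist (enumerate_pairwise a)
  have := (scanB k fes 0 [] "" hc hasc (by simp)).1 (Or.inr rfl)
  rw [this]
  rw [hfes, evU_filter, evT_filter]
  simp

-- ===== VERDICT (by name: the statement is the Claim_ definition above) =====
theorem findingTaxi_spec : Claim_equal_findingTaxi := by
  intro a k _
  unfold Spec_findingTaxi
  rw [findingTaxi_eq, findingTaxi_alt_eq]
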